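-- pv_equiv track=rewrite | github.com/MayarAbdelbaki/Smart-Safety-Inspector-Guard | pc_server.py | get_person_id
-- ===== SOURCE A (Python) =====
-- PERSON_ID_MAPPING = {
--     "Amr": "1010",
--     "Mariam": "1011",
--     "Mayar": "1012",
--     "Ashraf": "1013",
--     "Ayman": "1014",
--     "Badrawy": "1015"
-- }  # Add or edit entries to match your reference faces
--
-- def get_person_id(person_name):
--     """Get person ID from name using PERSON_ID_MAPPING."""
--     if not person_name:
--         return None
--
--     # Clean the person name (remove "unknown person", extra spaces, etc.)
--     person_name_clean = person_name.strip()
--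
--     # Check if it's "unknown person" or similar
--     if "unknown" in person_name_clean.lower():
--         return None
--
--     # Try exact match first
--     if person_name_clean in PERSON_ID_MAPPING:
--         return PERSON_ID_MAPPING[person_name_clean]
--
--     # Try case-insensitive match
--     for name, person_id in PERSON_ID_MAPPING.items():
--         if name.lower() == person_name_clean.lower():
--             return person_id
--
--     return None
-- ===== SOURCE B (Python) =====
-- PERSON_ID_MAPPING = {
--     "Amr": "1010",
--     "Mariam": "1011",
--     "Mayar": "1012",
--     "Ashraf": "1013",
--     "Ayman": "1014",
--     "Badrawy": "1015"
-- }
--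
-- # Normalized index built once: lowercase name -> id.
-- ID_BY_LOWER = {k.lower(): v for k, v in PERSON_ID_MAPPING.items()}
--
-- def get_person_id(person_name):
--     """Get person ID from name using a precomputed lowercase index."""
--     if not person_name:
--         return None
--     low = person_name.strip().lower()
--     if "unknown" in low:
--         return None
--     return ID_BY_LOWER.get(low)
-- ===== Notes on version B (the rewrite author's own statement) =====
-- stated objective: simpler
-- what changed: Replaced the exact-match check plus per-call linear scan over PERSON_ID_MAPPING.items() comparing lowercased keys by a single lookup in a module-level precomputed lowercase-keyed dict; valid because all keys have distinct lowercase forms.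
import Mathlib
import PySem

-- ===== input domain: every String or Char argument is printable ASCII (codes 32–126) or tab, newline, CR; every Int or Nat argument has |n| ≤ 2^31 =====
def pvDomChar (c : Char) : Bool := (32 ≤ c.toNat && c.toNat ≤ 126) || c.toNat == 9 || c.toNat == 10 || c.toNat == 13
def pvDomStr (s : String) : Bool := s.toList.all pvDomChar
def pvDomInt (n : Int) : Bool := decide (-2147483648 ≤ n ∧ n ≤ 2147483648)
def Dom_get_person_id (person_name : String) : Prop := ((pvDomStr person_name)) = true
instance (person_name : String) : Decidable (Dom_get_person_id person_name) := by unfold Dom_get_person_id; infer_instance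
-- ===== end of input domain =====

-- B replaces A's exact-match check plus per-call case-insensitive linear scan by one lookup
-- in a precomputed lowercase-keyed dict (all keys have distinct lowercase forms): simpler.

-- ===== PORT A =====
def PERSON_ID_MAPPING : PySem.Dict String String :=
  PySem.Dict.ofList [("Amr", "1010"), ("Mariam", "1011"), ("Mayar", "1012"),
                     ("Ashraf", "1013"), ("Ayman", "1014"), ("Badrawy", "1015")]

-- the 'for name, person_id in PERSON_ID_MAPPING.items()' loop of A
def pvScan : List (String × String) → String → Option String
  | [], _ => none
  | (name, pid) :: rest, low =>
      if PySem.Str.lower name = low then some pid else pvScan rest low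

def get_person_id (person_name : String) : Option String :=
  if person_name = "" then none
  else
    let person_name_clean := PySem.Str.strip person_name
    if PySem.Str.isIn "unknown" (PySem.Str.lower person_name_clean) then none
    else if PERSON_ID_MAPPING.contains person_name_clean then
      PERSON_ID_MAPPING.get? person_name_clean
    else
      pvScan PERSON_ID_MAPPING.items (PySem.Str.lower person_name_clean)

-- ===== PORT B =====
def ID_BY_LOWER : PySem.Dict String String :=
  PySem.Dict.ofList (PERSON_ID_MAPPING.items.map (fun kv => (PySem.Str.lower kv.1, kv.2)))

def get_person_id_alt (person_name : String) : Option String :=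
  if person_name = "" then none
  else
    let low := PySem.Str.lower (PySem.Str.strip person_name)
    if PySem.Str.isIn "unknown" low then none
    else ID_BY_LOWER.get? low

-- ===== PRECONDITION & SPEC =====
def Spec_get_person_id (person_name : String) (out : Option String) : Prop := out = get_person_id_alt person_name
instance (person_name : String) (out : Option String) : Decidable (Spec_get_person_id person_name out) := by unfold Spec_get_person_id; infer_instance

-- ===== CLAIM (what is proved, stated in full; the proofs are below) =====
def Claim_equal_get_person_id : Prop := ∀ (person_name : String), Dom_get_person_id person_name → Spec_get_person_id person_name (get_person_id person_name)

-- ===== LEMMAS AND PROOFS =====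

-- the scan over items and the lowercase-index lookup agree for every query string
theorem pvScan_eq_lookup (t : String) :
    pvScan PERSON_ID_MAPPING.items t = ID_BY_LOWER.get? t := by
  have h1 : PERSON_ID_MAPPING.items =
      [("Amr", "1010"), ("Mariam", "1011"), ("Mayar", "1012"),
       ("Ashraf", "1013"), ("Ayman", "1014"), ("Badrawy", "1015")] := rfl
  have h2 : ID_BY_LOWER =
      PySem.Dict.mk [("amr", "1010"), ("mariam", "1011"), ("mayar", "1012"),
       ("ashraf", "1013"), ("ayman", "1014"), ("badrawy", "1015")] := rfl
  have hAmr : PySem.Str.lower "Amr" = "amr" := by decide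
  have hMariam : PySem.Str.lower "Mariam" = "mariam" := by decide
  have hMayar : PySem.Str.lower "Mayar" = "mayar" := by decide
  have hAshraf : PySem.Str.lower "Ashraf" = "ashraf" := by decide
  have hAyman : PySem.Str.lower "Ayman" = "ayman" := by decide
  have hBadrawy : PySem.Str.lower "Badrawy" = "badrawy" := by decide
  rw [h1, h2]
  simp [pvScan, hAmr, hMariam, hMayar, hAshraf, hAyman, hBadrawy,
    PySem.Dict.get?, List.find?_cons, List.find?_nil]
  by_cases a1 : "amr" = t
  · subst a1; decide
  by_cases a2 : "mariam" = t
  · subst a2; decide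
  by_cases a3 : "mayar" = t
  · subst a3; decide
  by_cases a4 : "ashraf" = t
  · subst a4; decide
  by_cases a5 : "ayman" = t
  · subst a5; decide
  by_cases a6 : "badrawy" = t
  · subst a6; decide
  have b1 : ("amr" == t) = false := beq_eq_false_iff_ne.mpr a1
  have b2 : ("mariam" == t) = false := beq_eq_false_iff_ne.mpr a2
  have b3 : ("mayar" == t) = false := beq_eq_false_iff_ne.mpr a3
  have b4 : ("ashraf" == t) = false := beq_eq_false_iff_ne.mpr a4
  have b5 : ("ayman" == t) = false := beq_eq_false_iff_ne.mpr a5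
  have b6 : ("badrawy" == t) = false := beq_eq_false_iff_ne.mpr a6
  simp [a1, a2, a3, a4, a5, a6, b1, b2, b3, b4, b5, b6]

-- on the exact-match branch A's value coincides with the lowercase-index lookup
theorem pvExact_eq (c : String) :
    (if PERSON_ID_MAPPING.contains c then PERSON_ID_MAPPING.get? c
     else pvScan PERSON_ID_MAPPING.items (PySem.Str.lower c)) =
      ID_BY_LOWER.get? (PySem.Str.lower c) := by
  by_cases hc : PERSON_ID_MAPPING.contains c = true
  · have hk : c ∈ PERSON_ID_MAPPING.keys := (PySem.Dict.contains_iff_mem_keys PERSON_ID_MAPPING c).mp hc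
    have hkeys : PERSON_ID_MAPPING.keys =
        ["Amr", "Mariam", "Mayar", "Ashraf", "Ayman", "Badrawy"] := rfl
    rw [hkeys] at hk
    simp only [List.mem_cons, List.not_mem_nil, or_false] at hk
    rcases hk with h | h | h | h | h | h <;> subst h <;> decide
  · simp only [Bool.not_eq_true] at hc
    simp [hc, pvScan_eq_lookup]

theorem get_person_id_spec : Claim_equal_get_person_id := by
  intro s _
  unfold Spec_get_person_id get_person_id get_person_id_alt
  by_cases hs : s = ""
  · simp [hs]
  · simp only [if_neg hs]
    by_cases hu : PySem.Str.isIn "unknown" (PySem.Str.lower (PySem.Str.strip s)) = true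
    · rw [if_pos hu, if_pos hu]
    · rw [if_neg hu, if_neg hu]
      exact pvExact_eq _
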